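-- pv_equiv track=rewrite | github.com/anupyadav27/threat-engine | engines/ai-security/ai_security_engine/analyzer/ai_inventory_builder.py | _index_check_findings
-- ===== SOURCE A (Python) =====
-- from collections import defaultdict
-- from typing import Any, Dict, List, Optional
--
-- def _index_check_findings(
--     check_findings: List[Dict[str, Any]],
-- ) -> Dict[str, Dict[str, int]]:
--     """Index check findings by resource_uid with PASS/FAIL counts."""
--     by_resource: Dict[str, Dict[str, int]] = defaultdict(
--         lambda: {"pass": 0, "fail": 0}
--     )
--     for f in check_findings:
--         uid = f.get("resource_uid", "")
--         if not uid:
--             continue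
--         status = (f.get("status") or "").upper()
--         if status == "PASS":
--             by_resource[uid]["pass"] += 1
--         else:
--             by_resource[uid]["fail"] += 1
--     return dict(by_resource)
-- ===== SOURCE B (Python) =====
-- def _index_check_findings(check_findings):
--     """Two-phase: group uppercased statuses by uid, then derive counts."""
--     groups = {}
--     for f in check_findings:
--         uid = f.get("resource_uid", "")
--         if uid:
--             groups.setdefault(uid, []).append((f.get("status") or "").upper())
--     return {
--         uid: {"pass": statuses.count("PASS"),
--               "fail": len(statuses) - statuses.count("PASS")}
--         for uid, statuses in groups.items()
--     }
-- ===== Notes on version B (the rewrite author's own statement) =====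
-- stated objective: alternative
-- what changed: B separates collection from aggregation: one pass groups uppercased statuses per uid into lists, then a comprehension derives pass = count('PASS') and fail = len - pass, instead of A's inline defaultdict counter increments.
import Mathlib
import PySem

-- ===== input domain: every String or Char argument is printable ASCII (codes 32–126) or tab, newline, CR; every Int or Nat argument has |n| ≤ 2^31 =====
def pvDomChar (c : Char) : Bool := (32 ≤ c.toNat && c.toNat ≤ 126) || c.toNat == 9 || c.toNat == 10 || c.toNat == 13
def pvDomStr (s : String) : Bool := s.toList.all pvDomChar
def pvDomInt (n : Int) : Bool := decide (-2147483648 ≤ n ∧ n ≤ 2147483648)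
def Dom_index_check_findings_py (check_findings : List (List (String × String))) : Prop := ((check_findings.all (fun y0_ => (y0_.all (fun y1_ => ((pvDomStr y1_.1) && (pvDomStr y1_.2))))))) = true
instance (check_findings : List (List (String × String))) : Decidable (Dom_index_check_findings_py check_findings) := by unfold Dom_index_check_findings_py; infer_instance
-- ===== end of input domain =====

-- B changes the decomposition only (collect status lists per uid, then derive counts); same O(n) cost.

-- ===== PORT A =====
-- (f.get("status") or "").upper()  — literal: get? then `or ""` (falsy string → "")
def pvStatusA (f : List (String × String)) : String :=
  PySem.Str.upper (match (PySem.Dict.mk f).get? "status" with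
    | none => ""
    | some v => if v = "" then "" else v)

def pvStepA (d : PySem.Dict String (PySem.Dict String Int)) (f : List (String × String)) :
    PySem.Dict String (PySem.Dict String Int) :=
  let uid := (PySem.Dict.mk f).getD "resource_uid" ""
  if uid = "" then d
  else
    let status := pvStatusA f
    -- defaultdict: by_resource[uid] defaults to {"pass": 0, "fail": 0}
    let inner := d.getD uid ((PySem.Dict.empty.insert "pass" (0 : Int)).insert "fail" 0)
    if status = "PASS" then d.insert uid (inner.modify "pass" 0 (· + 1))
    else d.insert uid (inner.modify "fail" 0 (· + 1))

def index_check_findings_py (check_findings : List (List (String × String))) : List (String × List (String × Int)) :=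
  ((check_findings.foldl pvStepA PySem.Dict.empty).items).map (fun p => (p.1, p.2.items))

-- ===== PORT B =====
def pvStepB (g : PySem.Dict String (List String)) (f : List (String × String)) :
    PySem.Dict String (List String) :=
  let uid := (PySem.Dict.mk f).getD "resource_uid" ""
  if uid = "" then g
  else g.modify uid [] (· ++ [PySem.Str.upper ((PySem.Dict.mk f).getD "status" "")])

def index_check_findings_py_alt (check_findings : List (List (String × String))) : List (String × List (String × Int)) :=
  ((check_findings.foldl pvStepB PySem.Dict.empty).items).map
    (fun p => (p.1, [("pass", (p.2.count "PASS" : Int)), ("fail", (p.2.length : Int) - p.2.count "PASS")]))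

-- ===== PRECONDITION & SPEC =====
def Spec_index_check_findings_py (check_findings : List (List (String × String))) (out : List (String × List (String × Int))) : Prop := out = index_check_findings_py_alt check_findings
instance (check_findings : List (List (String × String))) (out : List (String × List (String × Int))) : Decidable (Spec_index_check_findings_py check_findings out) := by unfold Spec_index_check_findings_py; infer_instance

-- ===== CLAIM (what is proved, stated in full; the proofs are below) =====
def Claim_equal_index_check_findings_py : Prop := ∀ (check_findings : List (List (String × String))), Dom_index_check_findings_py check_findings → Spec_index_check_findings_py check_findings (index_check_findings_py check_findings)

-- ===== LEMMAS AND PROOFS =====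

-- A's counter dict for a status list l
def pvInner (l : List String) : PySem.Dict String Int :=
  PySem.Dict.mk [("pass", (l.count "PASS" : Int)), ("fail", (l.length : Int) - l.count "PASS")]

def pvTransform (g : PySem.Dict String (List String)) : PySem.Dict String (PySem.Dict String Int) :=
  PySem.Dict.mk (g.items.map (fun p => (p.1, pvInner p.2)))

theorem pvStatus_eq (f : List (String × String)) :
    pvStatusA f = PySem.Str.upper ((PySem.Dict.mk f).getD "status" "") := by
  unfold pvStatusA
  rw [PySem.Dict.getD_eq_get?_getD]
  cases (PySem.Dict.mk f).get? "status" with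
  | none => rfl
  | some v =>
    simp only [Option.getD]
    by_cases h : v = "" <;> simp [h]

theorem pvTransform_contains (g : PySem.Dict String (List String)) (k : String) :
    (pvTransform g).contains k = g.contains k := by
  obtain ⟨l⟩ := g
  induction l with
  | nil => rfl
  | cons p t ih =>
    simp [pvTransform, PySem.Dict.contains] at ih ⊢
    by_cases h : (p.1 == k) = true <;> simp [h, ih]

theorem pvTransform_getD (g : PySem.Dict String (List String)) (k : String) :
    (pvTransform g).getD k ((PySem.Dict.empty.insert "pass" (0 : Int)).insert "fail" 0)
      = pvInner (g.getD k []) := by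
  obtain ⟨l⟩ := g
  induction l with
  | nil => rfl
  | cons p t ih =>
    simp [pvTransform, PySem.Dict.getD_eq_get?_getD, PySem.Dict.get?] at ih ⊢
    by_cases h : (p.1 == k) = true <;> simp [h, ih]

theorem pvTransform_items (x : PySem.Dict String (List String)) :
    (pvTransform x).items = x.items.map (fun p => (p.1, pvInner p.2)) := rfl

theorem pvTransform_insert (g : PySem.Dict String (List String)) (k : String) (v : List String) :
    pvTransform (g.insert k v) = (pvTransform g).insert k (pvInner v) := by
  apply PySem.Dict.ext
  rw [pvTransform_items, PySem.Dict.items_insert, PySem.Dict.items_insert, pvTransform_contains]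
  by_cases hc : g.contains k = true
  · simp only [hc, if_true, pvTransform_items, List.map_map]
    congr 1
    funext p
    by_cases hp : p.1 = k <;> simp [hp]
  · simp [hc, pvTransform_items]

theorem pvInner_pass (l : List String) :
    (pvInner l).modify "pass" 0 (· + 1) = pvInner (l ++ ["PASS"]) := by
  simp [pvInner, PySem.Dict.modify, PySem.Dict.insert, PySem.Dict.contains,
        PySem.Dict.getD_eq_get?_getD, PySem.Dict.get?, List.count_append]

theorem pvInner_fail (l : List String) (s : String) (h : s ≠ "PASS") :
    (pvInner l).modify "fail" 0 (· + 1) = pvInner (l ++ [s]) := by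
  simp [pvInner, PySem.Dict.modify, PySem.Dict.insert, PySem.Dict.contains,
        PySem.Dict.getD_eq_get?_getD, PySem.Dict.get?, List.count_append, h]
  ring

theorem pvStep_comm (g : PySem.Dict String (List String)) (f : List (String × String)) :
    pvStepA (pvTransform g) f = pvTransform (pvStepB g f) := by
  unfold pvStepA pvStepB
  by_cases h : (PySem.Dict.mk f).getD "resource_uid" "" = ""
  · simp [h]
  · simp only [h, if_false]
    rw [pvStatus_eq, pvTransform_getD]
    conv_rhs => rw [PySem.Dict.modify]
    rw [pvTransform_insert]
    by_cases hp : PySem.Str.upper ((PySem.Dict.mk f).getD "status" "") = "PASS"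
    · rw [if_pos hp, hp, pvInner_pass]
    · rw [if_neg hp, pvInner_fail _ _ hp]

theorem pvFold_comm (cf : List (List (String × String))) (g : PySem.Dict String (List String)) :
    cf.foldl pvStepA (pvTransform g) = pvTransform (cf.foldl pvStepB g) := by
  induction cf generalizing g with
  | nil => rfl
  | cons f t ih => simp only [List.foldl_cons, pvStep_comm, ih]

-- ===== VERDICT (by name: the statement is the Claim_ definition above) =====
theorem index_check_findings_py_spec : Claim_equal_index_check_findings_py := by
  intro cf _
  unfold Spec_index_check_findings_py index_check_findings_py index_check_findings_py_alt
  have h0 : (PySem.Dict.empty : PySem.Dict String (PySem.Dict String Int)) = pvTransform PySem.Dict.empty := rfl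
  rw [h0, pvFold_comm]
  simp only [pvTransform, List.map_map]
  rfl
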